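-- pv_equiv track=rewrite | github.com/struggling-student/PythonExercises | PythonExercises/Esami/2021-2022/esame-28-1-22-mattina/examPY/program.mauman.py | ex2
-- ===== SOURCE A (Python) =====
-- def ex2(griglia, path):
--     x = 0
--     y = 0
--     stop = False
--     move_i = 0
--     result = []
--     while move_i < len(path) and stop is False:
--         move = path[move_i]
--         if move == "R":
--             x += 1
--         elif move == "L":
--             x -= 1
--         elif move == "U":
--             y -= 1
--         elif move == "D":
--             y += 1
--         elif move != "S":
--             stop = True
--         if stop is False:
--             x = x % len(griglia[0])
--             y = y % len(griglia)
--             result.append(griglia[y][x])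
--         move_i += 1
--     return result
-- ===== SOURCE B (Python) =====
-- def ex2(griglia, path):
--     # Find the length n of the leading prefix of valid moves, then walk it:
--     # accumulate unreduced coordinates first, reduce modulo the grid size only
--     # when reading the cells.
--     n = 0
--     while n < len(path) and path[n] in ("R", "L", "U", "D", "S"):
--         n += 1
--     if n == 0:
--         return []
--     cols = len(griglia[0])
--     rows = len(griglia)
--     dx = {"R": 1, "L": -1}
--     dy = {"U": -1, "D": 1}
--     pts = []
--     x = y = 0
--     for m in path[:n]:
--         x += dx.get(m, 0)
--         y += dy.get(m, 0)
--         pts.append((x, y))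
--     return [griglia[b % rows][a % cols] for a, b in pts]
-- ===== Notes on version B (the rewrite author's own statement) =====
-- stated objective: alternative
-- what changed: A interleaves everything in one while-loop with a stop flag, reducing x,y modulo the grid size at every step; B first finds the valid-move prefix length, then accumulates the unreduced cumulative coordinates, and finally reads the cells in a separate pass, taking the modulus only there.
-- outside the precondition, e.g. on ex2([['a', 'b'], ['c']], ['D']): A returns ['c'], B returns ['c']
import Mathlib
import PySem

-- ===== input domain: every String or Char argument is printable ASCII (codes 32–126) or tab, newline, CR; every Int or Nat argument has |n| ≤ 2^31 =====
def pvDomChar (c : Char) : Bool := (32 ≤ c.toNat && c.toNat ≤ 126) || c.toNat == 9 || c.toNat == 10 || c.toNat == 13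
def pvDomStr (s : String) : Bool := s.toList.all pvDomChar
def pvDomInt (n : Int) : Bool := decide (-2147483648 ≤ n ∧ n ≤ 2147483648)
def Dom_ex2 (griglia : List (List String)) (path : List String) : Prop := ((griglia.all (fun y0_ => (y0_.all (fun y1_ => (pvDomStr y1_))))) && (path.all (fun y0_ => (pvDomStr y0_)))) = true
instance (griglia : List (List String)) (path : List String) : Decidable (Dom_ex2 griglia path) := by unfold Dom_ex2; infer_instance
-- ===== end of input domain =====

-- B restructures A's single stop-flag loop into: find valid prefix length, accumulate
-- unreduced cumulative coordinates, then read cells modulo the grid size in a final pass.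
-- ===== PORT A =====
def ex2Go (g : List (List String)) : List String → Int → Int → List String → List String
  | [], _, _, res => res
  | move :: rest, x, y, res =>
    let s :=
      if move = "R" then (x + 1, y, false)
      else if move = "L" then (x - 1, y, false)
      else if move = "U" then (x, y - 1, false)
      else if move = "D" then (x, y + 1, false)
      else if move ≠ "S" then (x, y, true)
      else (x, y, false)
    if s.2.2 then res
    else
      let x' := PySem.Int.mod s.1 ((PySem.List.pyGetD g 0 []).length : Int)
      let y' := PySem.Int.mod s.2.1 ((g.length : Int))
      ex2Go g rest x' y' (res ++ [PySem.List.pyGetD (PySem.List.pyGetD g y' []) x' ""])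

def ex2 (griglia : List (List String)) (path : List String) : List String :=
  ex2Go griglia path 0 0 []

-- ===== PORT B =====
def ex2ValidN : List String → Nat
  | [] => 0
  | m :: rest => if m = "R" ∨ m = "L" ∨ m = "U" ∨ m = "D" ∨ m = "S" then ex2ValidN rest + 1 else 0

def ex2Acc : List String → Int → Int → List (Int × Int)
  | [], _, _ => []
  | m :: rest, x, y =>
    let x' := x + (if m = "R" then 1 else if m = "L" then -1 else 0)
    let y' := y + (if m = "U" then -1 else if m = "D" then 1 else 0)
    (x', y') :: ex2Acc rest x' y'

def ex2_alt (griglia : List (List String)) (path : List String) : List String :=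
  let n := ex2ValidN path
  if n = 0 then []
  else
    let cols := ((PySem.List.pyGetD griglia 0 []).length : Int)
    let rows := ((griglia.length : Int))
    (ex2Acc (path.take n) 0 0).map
      (fun p => PySem.List.pyGetD (PySem.List.pyGetD griglia (PySem.Int.mod p.2 rows) [])
                  (PySem.Int.mod p.1 cols) "")

-- ===== PRECONDITION & SPEC =====
-- Pre_ excludes inputs whose first path element is a valid move while the grid is empty,
-- has an empty first row, or has some row shorter than row 0: on the empty/empty-row cases
-- A raises (IndexError/ZeroDivisionError); on the ragged cases A may raise IndexError as soon
-- as the walk reaches a short row, so all ragged grids are excluded (slightly wider than the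
-- exact raising set; where A still returns there, B returns the same value).
def Pre_ex2 (griglia : List (List String)) (path : List String) : Prop :=
  (∀ m ∈ path.take 1, ¬(m = "R" ∨ m = "L" ∨ m = "U" ∨ m = "D" ∨ m = "S"))
  ∨ (griglia ≠ [] ∧ griglia.headD [] ≠ [] ∧
      ∀ row ∈ griglia, (griglia.headD []).length ≤ row.length)
instance (griglia : List (List String)) (path : List String) : Decidable (Pre_ex2 griglia path) := by unfold Pre_ex2; infer_instance
def pvWitness_ex2 : List (List String) × List String :=
  ([["a", "b"], ["c", "d"]], ["R", "D", "S", "X", "R"])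
def Spec_ex2 (griglia : List (List String)) (path : List String) (out : List String) : Prop := out = ex2_alt griglia path
instance (griglia : List (List String)) (path : List String) (out : List String) : Decidable (Spec_ex2 griglia path out) := by unfold Spec_ex2; infer_instance

-- ===== CLAIM (what is proved, stated in full; the proofs are below) =====
def Claim_equal_ex2 : Prop := ∀ (griglia : List (List String)) (path : List String), Dom_ex2 griglia path → Pre_ex2 griglia path → Spec_ex2 griglia path (ex2 griglia path)

-- ===== LEMMAS AND PROOFS =====
lemma ex2_mod_add_mod (a d m : Int) (hm : 0 < m) :
    PySem.Int.mod (PySem.Int.mod a m + d) m = PySem.Int.mod (a + d) m := by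
  rw [PySem.Int.mod_eq_emod_of_pos hm, PySem.Int.mod_eq_emod_of_pos hm,
      PySem.Int.mod_eq_emod_of_pos hm, Int.add_emod, Int.emod_emod_of_dvd _ dvd_rfl,
      ← Int.add_emod]

lemma ex2_mod_mod (a m : Int) (hm : 0 < m) :
    PySem.Int.mod (PySem.Int.mod a m) m = PySem.Int.mod a m := by
  have := ex2_mod_add_mod a 0 m hm
  simpa using this

lemma ex2Go_eq (g : List (List String))
    (hc : 0 < ((PySem.List.pyGetD g 0 []).length : Int)) (hr : 0 < ((g.length : Int)))
    (path : List String) : ∀ (sx sy : Int) (res : List String),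
    ex2Go g path (PySem.Int.mod sx ((PySem.List.pyGetD g 0 []).length : Int))
        (PySem.Int.mod sy ((g.length : Int))) res
      = res ++ (ex2Acc (path.take (ex2ValidN path)) sx sy).map
          (fun p => PySem.List.pyGetD (PySem.List.pyGetD g (PySem.Int.mod p.2 ((g.length : Int))) [])
                      (PySem.Int.mod p.1 (((PySem.List.pyGetD g 0 []).length : Int))) "") := by
  induction path with
  | nil => intro sx sy res; simp [ex2Go, ex2ValidN, ex2Acc]
  | cons m rest ih =>
    intro sx sy res
    by_cases hR : m = "R"
    · subst hR
      simp only [ex2Go, ex2ValidN, ex2Acc, String.reduceEq, reduceIte, List.take_succ_cons,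
        if_true, if_false, or_true, true_or, or_false, false_or, sub_eq_add_neg, add_zero]
      rw [ex2_mod_add_mod _ _ _ hc, ex2_mod_mod _ _ hr, ih (sx + 1) sy]
      simp
    · by_cases hL : m = "L"
      · subst hL
        simp only [ex2Go, ex2ValidN, ex2Acc, String.reduceEq, reduceIte, List.take_succ_cons,
          if_true, if_false, or_true, true_or, or_false, false_or, sub_eq_add_neg, add_zero]
        rw [ex2_mod_add_mod _ _ _ hc, ex2_mod_mod _ _ hr, ih (sx + -1) sy]
        simp
      · by_cases hU : m = "U"
        · subst hU
          simp only [ex2Go, ex2ValidN, ex2Acc, String.reduceEq, reduceIte, List.take_succ_cons,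
            if_true, if_false, or_true, true_or, or_false, false_or, sub_eq_add_neg, add_zero]
          rw [ex2_mod_add_mod _ _ _ hr, ex2_mod_mod _ _ hc, ih sx (sy + -1)]
          simp
        · by_cases hD : m = "D"
          · subst hD
            simp only [ex2Go, ex2ValidN, ex2Acc, String.reduceEq, reduceIte, List.take_succ_cons,
              if_true, if_false, or_true, true_or, or_false, false_or, sub_eq_add_neg, add_zero]
            rw [ex2_mod_add_mod _ _ _ hr, ex2_mod_mod _ _ hc, ih sx (sy + 1)]
            simp
          · by_cases hS : m = "S"
            · subst hS
              simp only [ex2Go, ex2ValidN, ex2Acc, String.reduceEq, reduceIte, List.take_succ_cons,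
                ne_eq, not_true, if_true, if_false, or_true, true_or, or_false, false_or,
                sub_eq_add_neg, add_zero]
              rw [ex2_mod_mod _ _ hc, ex2_mod_mod _ _ hr, ih sx sy]
              simp
            · simp [ex2Go, ex2ValidN, ex2Acc, hR, hL, hU, hD, hS]

lemma ex2_mod_zero (m : Int) (hm : 0 < m) : PySem.Int.mod 0 m = 0 := by
  rw [PySem.Int.mod_eq_emod_of_pos hm]; simp

-- ===== VERDICT (by name: the statement is the Claim_ definition above) =====
theorem ex2_spec : Claim_equal_ex2 := by
  intro g path _ hpre
  unfold Spec_ex2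
  rcases hpre with h | ⟨hg, hrow, _⟩
  · cases path with
    | nil => simp [ex2, ex2_alt, ex2Go, ex2ValidN]
    | cons m rest =>
      have hm := h m (by simp)
      simp only [not_or] at hm
      obtain ⟨hR, hL, hU, hD, hS⟩ := hm
      simp [ex2, ex2_alt, ex2Go, ex2ValidN, hR, hL, hU, hD, hS]
  · have hr : 0 < ((g.length : Int)) := by
      cases g with
      | nil => exact absurd rfl hg
      | cons a l => simp
    have hc : 0 < ((PySem.List.pyGetD g 0 []).length : Int) := by
      cases g with
      | nil => exact absurd rfl hg
      | cons a l =>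
        simp only [List.headD_cons] at hrow
        have : 0 < a.length := List.length_pos_of_ne_nil hrow
        simp [PySem.List.pyGetD_zero]
        omega
    have key := ex2Go_eq g hc hr path 0 0 []
    rw [ex2_mod_zero _ hc, ex2_mod_zero _ hr] at key
    rw [ex2, key, ex2_alt]
    by_cases hn : ex2ValidN path = 0
    · simp [hn, ex2Acc]
    · simp [hn]
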